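-- pv_equiv track=rewrite | github.com/gyueuna/Teammate | Algorithm.py | partition_students
-- ===== SOURCE A (Python) =====
-- MIN_TEAM_SIZE = 3
--
-- MAX_TEAM_SIZE = 4
--
-- def partition_students(n):
--     """
--     n명을 3명 또는 4명으로 분할하여 합이 n이 되도록 하는 팀 크기 리스트를 반환.
--     가능한 해 중 팀 수(x+y)를 최대화하는 분할을 선택.
--     """
--     best_total = -1
--     best_sizes = None
--     # x 팀이 3명, y 팀이 4명: 3*x + 4*y = n
--     for x in range(n // MIN_TEAM_SIZE + 1):
--         remainder = n - MIN_TEAM_SIZE * x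
--         if remainder < 0:
--             continue
--         if remainder % MAX_TEAM_SIZE == 0:
--             y = remainder // MAX_TEAM_SIZE
--             total = x + y
--             if total > best_total:
--                 best_total = total
--                 best_sizes = [MIN_TEAM_SIZE]*x + [MAX_TEAM_SIZE]*y
--     if best_sizes is None:
--         best_sizes = [MAX_TEAM_SIZE] * (n // MAX_TEAM_SIZE)
--     return best_sizes
-- ===== SOURCE B (Python) =====
-- def partition_students(n):
--     # O(1) case analysis: maximizing x+y = (n+x)/4 means taking the largest
--     # feasible x, i.e. the smallest y; y must be congruent to n mod 3, so the
--     # minimal y is r = n % 3 (feasible iff n >= 4*r).  Same fallback as A.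
--     if n >= 0:
--         r = n % 3
--         if n >= 4 * r:
--             x = (n - 4 * r) // 3
--             return [3] * x + [4] * r
--     return [4] * (n // 4)
-- ===== Notes on version B (the rewrite author's own statement) =====
-- stated objective: faster
-- what changed: Replaces A's O(n) linear scan over all candidate 3-person team counts with an O(1) closed-form case analysis on n mod 3 (minimal number of 4-person teams), keeping A's [4]*(n//4) fallback for infeasible or negative n.
import Mathlib
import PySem

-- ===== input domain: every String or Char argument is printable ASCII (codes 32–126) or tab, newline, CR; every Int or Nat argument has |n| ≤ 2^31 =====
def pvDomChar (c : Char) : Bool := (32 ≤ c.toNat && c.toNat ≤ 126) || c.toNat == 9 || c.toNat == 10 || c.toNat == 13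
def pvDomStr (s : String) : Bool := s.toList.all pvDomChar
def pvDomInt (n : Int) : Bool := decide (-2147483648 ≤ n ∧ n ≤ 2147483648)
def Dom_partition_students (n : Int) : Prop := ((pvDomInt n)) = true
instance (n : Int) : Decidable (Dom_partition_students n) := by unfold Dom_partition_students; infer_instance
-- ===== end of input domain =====

-- B replaces A's O(n) scan over candidate 3-team counts with an O(1) case analysis on n % 3.


-- ===== PORT A =====
-- one loop iteration of A: state = (best_total, best_sizes)
def pvStepA (n : Int) (st : Int × Option (List Int)) (x : Int) : Int × Option (List Int) :=
  let remainder := n - 3 * x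
  if remainder < 0 then st
  else if PySem.Int.mod remainder 4 = 0 then
    let y := PySem.Int.floordiv remainder 4
    let total := x + y
    if st.1 < total then
      (total, some (List.replicate x.toNat 3 ++ List.replicate y.toNat 4))
    else st
  else st

def partition_students (n : Int) : List Int :=
  match ((PySem.List.pyRange 0 (PySem.Int.floordiv n 3 + 1) 1).foldl (pvStepA n)
          ((-1 : Int), (none : Option (List Int)))).2 with
  | some l => l
  | none => List.replicate (PySem.Int.floordiv n 4).toNat 4

-- ===== PORT B =====
def partition_students_alt (n : Int) : List Int :=
  if 0 ≤ n then
    if 4 * PySem.Int.mod n 3 ≤ n then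
      List.replicate (PySem.Int.floordiv (n - 4 * PySem.Int.mod n 3) 3).toNat 3 ++
        List.replicate (PySem.Int.mod n 3).toNat 4
    else List.replicate (PySem.Int.floordiv n 4).toNat 4
  else List.replicate (PySem.Int.floordiv n 4).toNat 4

-- ===== PRECONDITION & SPEC =====
def Spec_partition_students (n : Int) (out : List Int) : Prop := out = partition_students_alt n
instance (n : Int) (out : List Int) : Decidable (Spec_partition_students n out) := by unfold Spec_partition_students; infer_instance

-- ===== CLAIM (what is proved, stated in full; the proofs are below) =====
def Claim_equal_partition_students : Prop := ∀ (n : Int), Dom_partition_students n → Spec_partition_students n (partition_students n)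

-- ===== LEMMAS AND PROOFS =====

-- x is a feasible number of 3-person teams for total n
abbrev pvFeas (n x : Int) : Prop := 0 ≤ x ∧ 0 ≤ n - 3 * x ∧ (n - 3 * x) % 4 = 0

-- no feasible x exists when n ≥ 0 and n < 4 * (n % 3)  (i.e. n ∈ {1, 2, 5})
theorem pvNoFeas (n X : Int) (hn : 0 ≤ n) (hr : ¬ 4 * (n % 3) ≤ n) (h : pvFeas n X) : False := by
  obtain ⟨a1, a2, a3⟩ := h
  have h7 : n < 8 := by omega
  interval_cases n <;> omega

-- every feasible x is at most (n - 4 * (n % 3)) / 3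
theorem pvFeas_le (n X : Int) (h : pvFeas n X) : X ≤ (n - 4 * (n % 3)) / 3 := by
  obtain ⟨a1, a2, a3⟩ := h
  have h5 : n - 3 * X = 4 * ((n - 3 * X) / 4) := by omega
  have h6 : (4 * ((n - 3 * X) / 4)) % 3 = ((n - 3 * X) / 4) % 3 := by omega
  omega

theorem pvStepA_eq (n : Int) (st : Int × Option (List Int)) (x : Int) (hx : 0 ≤ x) :
    pvStepA n st x =
      if pvFeas n x then
        (if st.1 < x + (n - 3 * x) / 4 then
          (x + (n - 3 * x) / 4,
           some (List.replicate x.toNat 3 ++ List.replicate ((n - 3 * x) / 4).toNat 4))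
         else st)
      else st := by
  have h4 : (0:Int) < 4 := by norm_num
  unfold pvStepA pvFeas
  simp only [PySem.Int.mod_eq_emod_of_pos h4, PySem.Int.floordiv_eq_ediv_of_pos h4]
  by_cases h1 : n - 3 * x < 0
  · simp only [if_pos h1]
    have : ¬ (0 ≤ x ∧ 0 ≤ n - 3 * x ∧ (n - 3 * x) % 4 = 0) := by omega
    rw [if_neg this]
  · simp only [if_neg h1]
    by_cases h2 : (n - 3 * x) % 4 = 0
    · have : (0 ≤ x ∧ 0 ≤ n - 3 * x ∧ (n - 3 * x) % 4 = 0) := by omega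
      simp only [if_pos h2, if_pos this]
    · have : ¬ (0 ≤ x ∧ 0 ≤ n - 3 * x ∧ (n - 3 * x) % 4 = 0) := by omega
      simp only [if_neg h2, if_neg this]

-- loop characterization: after scanning x = 0 .. m-1 the state is either untouched
-- (no feasible x below m) or records the LARGEST feasible x below m
theorem pvLoop_char (n : Int) (m : Nat) :
    ((∀ x : Int, 0 ≤ x → x < (m : Int) → ¬ pvFeas n x) ∧
      (PySem.List.pyRange 0 (m : Int) 1).foldl (pvStepA n) ((-1 : Int), none) = (-1, none))
    ∨ (∃ X : Int, pvFeas n X ∧ X < (m : Int) ∧ (∀ x : Int, pvFeas n x → x < (m : Int) → x ≤ X) ∧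
      (PySem.List.pyRange 0 (m : Int) 1).foldl (pvStepA n) ((-1 : Int), none) =
        (X + (n - 3 * X) / 4,
         some (List.replicate X.toNat 3 ++ List.replicate ((n - 3 * X) / 4).toNat 4))) := by
  induction m with
  | zero =>
    left
    constructor
    · intro x hx hlt; omega
    · rw [PySem.List.pyRange_one_eq_nil (by norm_num)]
      rfl
  | succ m ih =>
    have hsplit : PySem.List.pyRange 0 ((m : Int) + 1) 1 =
        PySem.List.pyRange 0 (m : Int) 1 ++ [(m : Int)] := by
      exact PySem.List.pyRange_one_succ_right (by positivity)
    have hcast : ((m + 1 : Nat) : Int) = (m : Int) + 1 := by push_cast; ring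
    rw [hcast, hsplit, List.foldl_append]
    by_cases hm : pvFeas n (m : Int)
    · -- step at x = m updates the state (its total strictly beats any earlier feasible x)
      right
      refine ⟨(m : Int), hm, by omega, ?_, ?_⟩
      · intro x hx hlt; omega
      · rcases ih with ⟨hnone, heq⟩ | ⟨X, hX, hXlt, hXmax, heq⟩
        · rw [heq]
          simp only [List.foldl_cons, List.foldl_nil]
          rw [pvStepA_eq n _ _ (by positivity), if_pos hm]
          have : (-1 : Int) < (m : Int) + (n - 3 * (m : Int)) / 4 := by
            obtain ⟨h1, h2, h3⟩ := hm; omega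
          rw [if_pos this]
        · rw [heq]
          simp only [List.foldl_cons, List.foldl_nil]
          rw [pvStepA_eq n _ _ (by positivity), if_pos hm]
          have hlt : X + (n - 3 * X) / 4 < (m : Int) + (n - 3 * (m : Int)) / 4 := by
            obtain ⟨a1, a2, a3⟩ := hX; obtain ⟨b1, b2, b3⟩ := hm; omega
          rw [if_pos hlt]
    · -- step at x = m leaves the state unchanged
      have hstep : ∀ st, pvStepA n st (m : Int) = st := by
        intro st; rw [pvStepA_eq n st _ (by positivity), if_neg hm]
      rcases ih with ⟨hnone, heq⟩ | ⟨X, hX, hXlt, hXmax, heq⟩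
      · left
        refine ⟨?_, ?_⟩
        · intro x hx hlt
          by_cases hxm : x = (m : Int)
          · subst hxm; exact hm
          · exact hnone x hx (by omega)
        · rw [heq]; simp only [List.foldl_cons, List.foldl_nil, hstep]
      · right
        refine ⟨X, hX, by omega, ?_, ?_⟩
        · intro x hx hlt
          by_cases hxm : x = (m : Int)
          · subst hxm; exact absurd hx hm
          · exact hXmax x hx (by omega)
        · rw [heq]; simp only [List.foldl_cons, List.foldl_nil, hstep]

-- ===== VERDICT (by name: the statement is the Claim_ definition above) =====
theorem partition_students_spec : Claim_equal_partition_students := by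
  intro n _
  unfold Spec_partition_students partition_students partition_students_alt
  have h3 : (0:Int) < 3 := by norm_num
  have h4 : (0:Int) < 4 := by norm_num
  rw [PySem.Int.mod_eq_emod_of_pos h3]
  by_cases hn : 0 ≤ n
  · rw [if_pos hn]
    set b : Int := PySem.Int.floordiv n 3 + 1 with hb
    have hbe : b = n / 3 + 1 := by rw [hb, PySem.Int.floordiv_eq_ediv_of_pos h3]
    have hbpos : 0 < b := by rw [hbe]; omega
    have hbnat : ((b.toNat : Nat) : Int) = b := Int.toNat_of_nonneg (le_of_lt hbpos)
    have hchar := pvLoop_char n b.toNat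
    rw [hbnat] at hchar
    by_cases hr : 4 * (n % 3) ≤ n
    · rw [if_pos hr]
      -- the scan must have found the maximal feasible x, namely (n - 4*(n%3)) / 3
      set X0 : Int := (n - 4 * (n % 3)) / 3 with hX0
      have hX0e : 3 * X0 = n - 4 * (n % 3) := by rw [hX0]; omega
      have hX0feas : pvFeas n X0 := by unfold pvFeas; omega
      have hX0lt : X0 < b := by rw [hbe]; omega
      rcases hchar with ⟨hnone, _⟩ | ⟨X, hX, hXlt, hXmax, heq⟩
      · exact absurd hX0feas (hnone X0 hX0feas.1 hX0lt)
      · have h1 : X0 ≤ X := hXmax X0 hX0feas hX0lt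
        have h2 : X ≤ X0 := by rw [hX0]; exact pvFeas_le n X hX
        have hXX : X = X0 := le_antisymm h2 h1
        have hy : (n - 3 * X0) / 4 = n % 3 := by omega
        have hB : PySem.Int.floordiv (n - 4 * (n % 3)) 3 = X0 := by
          rw [PySem.Int.floordiv_eq_ediv_of_pos h3, ← hX0]
        rw [heq, hXX, hy, hB]
    · rw [if_neg hr]
      -- n ∈ {1,2,5}: no feasible x at all, both sides take the [4]*(n//4) fallback
      rcases hchar with ⟨_, heq⟩ | ⟨X, hX, _, _, _⟩
      · rw [heq]
      · exact absurd hX (pvNoFeas n X hn hr)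
  · rw [if_neg hn]
    -- n < 0: the range is empty, both sides take the fallback
    have hemp : PySem.List.pyRange 0 (PySem.Int.floordiv n 3 + 1) 1 = [] := by
      apply PySem.List.pyRange_one_eq_nil
      rw [PySem.Int.floordiv_eq_ediv_of_pos h3]
      omega
    rw [hemp]
    rfl
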